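-- pv_equiv track=rewrite | github.com/af-orozcog/competitiveProgramming | CodeForces/div3/uni.py | strr
-- ===== SOURCE A (Python) =====
-- def strr(leng, letter):
-- 	a = "abcdefghijklmnopqrstuvwxyz"
-- 	counter = 0
-- 	answer = ""
-- 	each = leng / letter
-- 	each = int(each)
-- 	actual = 0
-- 	num = 0
-- 	while(counter < leng):
-- 		answer = answer + a[actual]
-- 		num += 1
-- 		if(num == each and actual < letter - 1):
-- 			num = 0
-- 			actual += 1
-- 		counter += 1
-- 	return answer
-- ===== SOURCE B (Python) =====
-- def strr(leng, letter):
--     a = "abcdefghijklmnopqrstuvwxyz"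
--     each = int(leng / letter)
--     if leng <= 0:
--         return ""
--     if each <= 0:
--         return a[0] * leng
--     segments = [a[j] * each for j in range(letter - 1)]
--     segments.append(a[letter - 1] * (leng - each * (letter - 1)))
--     return "".join(segments)
-- ===== Notes on version B (the rewrite author's own statement) =====
-- stated objective: faster
-- what changed: Replaces A's per-character while-loop with its counter/pointer state machine by a closed-form block construction: letter-1 full blocks of size each=int(leng/letter) plus one remainder block, joined at once (early returns for leng<=0 and each==0).
import Mathlib
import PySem

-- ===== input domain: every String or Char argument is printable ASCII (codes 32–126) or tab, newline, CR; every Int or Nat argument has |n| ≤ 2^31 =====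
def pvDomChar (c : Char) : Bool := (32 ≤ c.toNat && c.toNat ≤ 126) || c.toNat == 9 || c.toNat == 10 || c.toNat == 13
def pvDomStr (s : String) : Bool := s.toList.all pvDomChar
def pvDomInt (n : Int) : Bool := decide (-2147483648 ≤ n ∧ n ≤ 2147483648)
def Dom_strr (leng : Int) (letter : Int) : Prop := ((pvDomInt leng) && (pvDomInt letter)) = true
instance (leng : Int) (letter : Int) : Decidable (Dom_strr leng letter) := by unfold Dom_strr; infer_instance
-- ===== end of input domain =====

-- B replaces A's O(leng^2) per-character while-loop (counter/pointer state machine with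
-- repeated string concatenation) by a closed-form block construction joined at once.

-- the constant a = "abcdefghijklmnopqrstuvwxyz", shared by both ports
def pvAlpha : List Char :=
  ['a','b','c','d','e','f','g','h','i','j','k','l','m',
   'n','o','p','q','r','s','t','u','v','w','x','y','z']

-- ===== PORT A =====
-- while(counter < leng): runs exactly leng.toNat iterations; state (actual, num, answer).
-- a[actual] is PySem.List.pyGetD (in range for every input admitted by Pre_strr below).
def strrLoopA (each : Int) (letter : Int) :
    Nat → Int → Int → List Char → List Char
  | 0, _, _, answer => answer
  | n + 1, actual, num, answer =>
    let answer := answer ++ [PySem.List.pyGetD pvAlpha actual 'a']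
    let num := num + 1
    if num = each ∧ actual < letter - 1 then
      strrLoopA each letter n (actual + 1) 0 answer
    else
      strrLoopA each letter n actual num answer

def strr (leng : Int) (letter : Int) : String :=
  -- each = int(leng / letter): exact trunc division on the |n| ≤ 2^31 domain
  let each := PySem.Int.truncdiv leng letter
  String.ofList (strrLoopA each letter leng.toNat 0 0 [])

-- ===== PORT B =====
def strr_alt (leng : Int) (letter : Int) : String :=
  let each := PySem.Int.truncdiv leng letter
  if leng ≤ 0 then ""
  else if each ≤ 0 then
    String.ofList (List.replicate leng.toNat (PySem.List.pyGetD pvAlpha 0 'a'))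
  else
    let segments := (PySem.List.pyRange 0 (letter - 1)).map
      (fun j => List.replicate each.toNat (PySem.List.pyGetD pvAlpha j 'a'))
    let segments := segments ++
      [List.replicate (leng - each * (letter - 1)).toNat
        (PySem.List.pyGetD pvAlpha (letter - 1) 'a')]
    String.ofList segments.flatten

-- ===== PRECONDITION & SPEC =====
-- Pre_ excludes exactly the inputs where Python A raises: letter = 0 (ZeroDivisionError in
-- leng/letter) and 27 ≤ letter ≤ leng (the pointer walks past 'z': IndexError a[26]).
def Pre_strr (leng : Int) (letter : Int) : Prop :=
  letter ≠ 0 ∧ ¬(27 ≤ letter ∧ letter ≤ leng)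
instance (leng : Int) (letter : Int) : Decidable (Pre_strr leng letter) := by
  unfold Pre_strr; infer_instance

def pvWitness_strr : Int × Int := (10, 3)

def Spec_strr (leng : Int) (letter : Int) (out : String) : Prop := out = strr_alt leng letter
instance (leng : Int) (letter : Int) (out : String) : Decidable (Spec_strr leng letter out) := by
  unfold Spec_strr; infer_instance

-- ===== CLAIM (what is proved, stated in full; the proofs are below) =====
def Claim_equal_strr : Prop := ∀ (leng : Int) (letter : Int),
  Dom_strr leng letter → Pre_strr leng letter → Spec_strr leng letter (strr leng letter)

-- ===== LEMMAS AND PROOFS =====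

-- If the advance condition can never fire (each ≤ 0, or the pointer already sits on the
-- last admissible letter), the loop just emits the current letter n times.
theorem strrLoopA_const (each letter : Int) (n : Nat) :
    ∀ (actual num : Int) (ans : List Char), 0 ≤ num →
    (each ≤ 0 ∨ letter - 1 ≤ actual) →
    strrLoopA each letter n actual num ans =
      ans ++ List.replicate n (PySem.List.pyGetD pvAlpha actual 'a') := by
  induction n with
  | zero => intro actual num ans _ _; simp [strrLoopA]
  | succ n ih =>
    intro actual num ans hnum hcond
    have hfalse : ¬ (num + 1 = each ∧ actual < letter - 1) := by
      rcases hcond with h | h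
      · intro ⟨h1, _⟩; omega
      · intro ⟨_, h2⟩; omega
    simp only [strrLoopA, if_neg hfalse]
    rw [ih (actual) (num + 1) _ (by omega) hcond]
    simp [List.replicate_succ]

-- One full block: starting a fresh letter (num = 0) with each ≥ 1 and room to advance,
-- the loop emits `each` copies of that letter and moves to the next one.
-- Stated with num = each - k, descending k from each to 1.
theorem strrLoopA_block (each letter : Int) (_heach : 1 ≤ each) :
    ∀ (k : Nat), 1 ≤ k → (k : Int) ≤ each →
    ∀ (n : Nat) (actual : Int) (ans : List Char), k ≤ n →
    actual < letter - 1 →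
    strrLoopA each letter n actual (each - k) ans =
      strrLoopA each letter (n - k) (actual + 1) 0
        (ans ++ List.replicate k (PySem.List.pyGetD pvAlpha actual 'a')) := by
  intro k
  induction k with
  | zero => omega
  | succ k ih =>
    intro _ hk n actual ans hn hact
    obtain ⟨n', rfl⟩ : ∃ n', n = n' + 1 := ⟨n - 1, by omega⟩
    by_cases hk1 : k = 0
    · subst hk1
      have hcond : each - (1 : Int) + 1 = each ∧ actual < letter - 1 := ⟨by ring, hact⟩
      simp only [strrLoopA]
      rw [if_pos (by push_cast; exact hcond)]
      simp
    · have hfalse : ¬ (each - ((k : Int) + 1) + 1 = each ∧ actual < letter - 1) := by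
        intro ⟨h1, _⟩; omega
      simp only [strrLoopA]
      rw [if_neg (by push_cast; exact hfalse)]
      have : each - ((k : Nat) + 1 : Nat) + 1 = each - (k : Nat) := by push_cast; ring
      rw [this, ih (by omega) (by omega) n' actual _ (by omega) hact]
      have hrw : n' + 1 - (k + 1) = n' - k := by omega
      rw [hrw]
      congr 1
      simp [List.replicate_succ, List.append_assoc]

-- Walking the remaining m full blocks then the tail: the loop from letter-1-m with a
-- fresh counter produces exactly B's segment list from that point on.
theorem strrLoopA_blocks (leng letter each : Int) (heach : 1 ≤ each)
    (hlast : each * (letter - 1) < leng) :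
    ∀ (m : Nat), (m : Int) ≤ letter - 1 →
    ∀ (n : Nat) (ans : List Char), (n : Int) = leng - each * (letter - 1 - m) →
    strrLoopA each letter n (letter - 1 - m) 0 ans =
      ans ++ (((PySem.List.pyRange (letter - 1 - m) (letter - 1)).map
          (fun j => List.replicate each.toNat (PySem.List.pyGetD pvAlpha j 'a'))).flatten
        ++ List.replicate (leng - each * (letter - 1)).toNat
            (PySem.List.pyGetD pvAlpha (letter - 1) 'a')) := by
  intro m
  induction m with
  | zero =>
    intro _ n ans hn
    simp only [Nat.cast_zero, sub_zero] at hn ⊢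
    rw [strrLoopA_const each letter n (letter - 1) 0 ans le_rfl (Or.inr le_rfl)]
    have hrange : PySem.List.pyRange (letter - 1) (letter - 1) = [] := by
      simp [PySem.List.pyRange]
    rw [hrange]
    have : n = (leng - each * (letter - 1)).toNat := by omega
    simp [this]
  | succ m ih =>
    intro hm n ans hn
    have hact : letter - 1 - ((m : Int) + 1) < letter - 1 := by omega
    have hcast : (each.toNat : Int) = each := Int.toNat_of_nonneg (by omega)
    have hm0 : (0 : Int) ≤ each * (m : Int) := mul_nonneg (by omega) (by positivity)
    have e1 : (n : Int) = (leng - each * (letter - 1)) + each * (m : Int) + each := by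
      rw [hn]; push_cast; ring
    have hkn : each.toNat ≤ n := by
      have h2 : (each.toNat : Int) ≤ (n : Int) := by rw [hcast]; linarith
      exact_mod_cast h2
    have step := strrLoopA_block each letter heach each.toNat (by omega) (by omega)
      n (letter - 1 - ((m : Int) + 1)) ans hkn hact
    have hnum0 : each - (each.toNat : Int) = 0 := by omega
    rw [hnum0] at step
    push_cast at step ⊢
    rw [step]
    have harg : letter - 1 - ((m : Int) + 1) + 1 = letter - 1 - m := by ring
    rw [harg]
    have hfuel : ((n - each.toNat : Nat) : Int) = leng - each * (letter - 1 - (m : Int)) := by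
      rw [Nat.cast_sub hkn, hcast, e1]; ring
    rw [ih (by push_cast at hm; omega) (n - each.toNat) _ hfuel]
    have hcons : PySem.List.pyRange (letter - 1 - ((m:Int) + 1)) (letter - 1)
        = (letter - 1 - ((m:Int) + 1)) :: PySem.List.pyRange (letter - 1 - ((m:Int) + 1) + 1) (letter - 1) :=
      PySem.List.pyRange_one_cons (by omega)
    rw [hcons, harg]
    simp [List.append_assoc]

-- each = int(leng/letter) cannot be positive unless 0 < letter (for 0 < leng).
theorem truncdiv_pos_letter {leng letter : Int} (h : 1 ≤ PySem.Int.truncdiv leng letter)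
    (hl : 0 < leng) : 0 < letter := by
  by_contra hneg
  rw [not_lt] at hneg
  rcases lt_or_eq_of_le hneg with hlt | rfl
  · have : leng.tdiv letter ≤ 0 := Int.tdiv_nonpos_of_nonneg_of_nonpos (by omega) (by omega)
    simp only [PySem.Int.truncdiv] at h
    omega
  · simp only [PySem.Int.truncdiv, Int.tdiv_zero] at h
    omega

-- For 0 < letter and 0 ≤ leng, each * letter ≤ leng.
theorem truncdiv_mul_le {leng letter : Int} (hl : 0 ≤ leng) (hpos : 0 < letter) :
    PySem.Int.truncdiv leng letter * letter ≤ leng := by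
  simp only [PySem.Int.truncdiv, Int.tdiv_eq_ediv_of_nonneg hl]
  exact Int.ediv_mul_le leng (by omega)

-- ===== VERDICT (by name: the statement is the Claim_ definition above) =====
theorem strr_spec : Claim_equal_strr := by
  intro leng letter _ hpre
  unfold Spec_strr strr strr_alt
  simp only []
  set each := PySem.Int.truncdiv leng letter with heach
  by_cases hleng : leng ≤ 0
  · have h0 : leng.toNat = 0 := by omega
    rw [if_pos hleng, h0]
    rfl
  · rw [if_neg hleng]
    by_cases he : each ≤ 0
    · rw [if_pos he]
      rw [strrLoopA_const each letter leng.toNat 0 0 [] le_rfl (Or.inl he)]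
      simp
    · rw [if_neg he]
      have hlpos : 0 < letter := truncdiv_pos_letter (by rw [← heach]; omega) (by omega)
      have hmul : each * letter ≤ leng := truncdiv_mul_le (by omega) hlpos
      have hlast : each * (letter - 1) < leng := by nlinarith
      have h0 : letter - 1 - (((letter - 1).toNat : Nat) : Int) = 0 := by omega
      have main := strrLoopA_blocks leng letter each (by omega) hlast (letter - 1).toNat
        (by omega) leng.toNat [] (by rw [h0, mul_zero]; omega)
      rw [h0] at main
      rw [main]
      simp
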